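-- pv_equiv track=rewrite | github.com/Gabriel-Caldas/google_challenge_foobar | sol3.py | solution
-- ===== SOURCE A (Python) =====
-- def solution(x, y):
--     yo = 1
--     for vertical in range(y-1):
--         yo = yo + (vertical+1)
--
--     id_ = [yo]
--     for horizontal in range(x-1):
--         id_.append(y+(horizontal+1))
--
--     id_ = sum(id_)
--
--     return str(id_)
-- ===== SOURCE B (Python) =====
-- def solution(x, y):
--     m = max(y - 1, 0)
--     n = max(x - 1, 0)
--     return str(1 + m * (m + 1) // 2 + n * y + n * (n + 1) // 2)
-- ===== Notes on version B (the rewrite author's own statement) =====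
-- stated objective: faster
-- what changed: Replaced the two accumulation loops (triangular sum for y, appended list summed for x) by the closed-form arithmetic-series formula 1 + m(m+1)/2 + n*y + n(n+1)/2 with m=max(y-1,0), n=max(x-1,0).
import Mathlib
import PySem

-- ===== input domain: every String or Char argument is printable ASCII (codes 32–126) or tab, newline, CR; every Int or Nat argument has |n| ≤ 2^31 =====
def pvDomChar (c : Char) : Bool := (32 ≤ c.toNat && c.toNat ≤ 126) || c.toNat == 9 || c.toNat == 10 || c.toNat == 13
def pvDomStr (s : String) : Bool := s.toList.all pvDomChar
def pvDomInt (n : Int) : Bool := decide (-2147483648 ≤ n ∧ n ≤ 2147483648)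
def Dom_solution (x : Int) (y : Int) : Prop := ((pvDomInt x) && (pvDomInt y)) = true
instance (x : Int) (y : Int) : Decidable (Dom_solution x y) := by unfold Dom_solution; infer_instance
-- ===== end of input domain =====

-- B replaces both loops by the closed-form arithmetic-series formula (O(1) instead of O(x+y)).

-- ===== PORT A =====
def solution (x : Int) (y : Int) : String :=
  let yo : Int := (PySem.List.pyRange 0 (y - 1) 1).foldl
    (fun yo vertical => yo + (vertical + 1)) 1
  let id_ : List Int := (PySem.List.pyRange 0 (x - 1) 1).foldl
    (fun id_ horizontal => id_ ++ [y + (horizontal + 1)]) [yo]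
  PySem.Int.toStr id_.sum

-- ===== PORT B =====
def solution_alt (x : Int) (y : Int) : String :=
  let m : Int := max (y - 1) 0
  let n : Int := max (x - 1) 0
  PySem.Int.toStr (1 + PySem.Int.floordiv (m * (m + 1)) 2 + n * y
    + PySem.Int.floordiv (n * (n + 1)) 2)

-- ===== PRECONDITION & SPEC =====
def Spec_solution (x : Int) (y : Int) (out : String) : Prop := out = solution_alt x y
instance (x : Int) (y : Int) (out : String) : Decidable (Spec_solution x y out) := by unfold Spec_solution; infer_instance

-- ===== CLAIM (what is proved, stated in full; the proofs are below) =====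
def Claim_equal_solution : Prop := ∀ (x : Int) (y : Int), Dom_solution x y → Spec_solution x y (solution x y)

-- ===== LEMMAS AND PROOFS =====

theorem pv_loop1 (N : Nat) (c : Int) :
    ((List.range N).map (fun (k : Nat) => ((0 : Int) + (k : Int)))).foldl (fun a v => a + (v + 1)) c
      = c + ((N * (N + 1)) / 2 : Nat) := by
  induction N generalizing c with
  | zero => simp
  | succ n ih =>
      rw [List.range_succ, List.map_append, List.foldl_append, ih]
      simp only [List.map_cons, List.map_nil, List.foldl_cons, List.foldl_nil]
      have h2 : (n + 1) * (n + 1 + 1) = n * (n + 1) + 2 * (n + 1) := by ring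
      have h3 : 2 ∣ n * (n + 1) := (Nat.even_mul_succ_self n).two_dvd
      have h : ((n + 1) * (n + 1 + 1)) / 2 = (n * (n + 1)) / 2 + (n + 1) := by omega
      rw [h]
      push_cast
      ring

theorem pv_loop2 (y : Int) (M : Nat) (l0 : List Int) :
    (((List.range M).map (fun (k : Nat) => ((0 : Int) + (k : Int)))).foldl
        (fun l h => l ++ [y + (h + 1)]) l0).sum
      = l0.sum + M * y + ((M * (M + 1)) / 2 : Nat) := by
  induction M generalizing l0 with
  | zero => simp
  | succ n ih =>
      rw [List.range_succ, List.map_append, List.foldl_append]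
      simp only [List.map_cons, List.map_nil, List.foldl_cons, List.foldl_nil]
      rw [List.sum_append, ih]
      simp only [List.sum_cons, List.sum_nil]
      have h2 : (n + 1) * (n + 1 + 1) = n * (n + 1) + 2 * (n + 1) := by ring
      have h3 : 2 ∣ n * (n + 1) := (Nat.even_mul_succ_self n).two_dvd
      have h : ((n + 1) * (n + 1 + 1)) / 2 = (n * (n + 1)) / 2 + (n + 1) := by omega
      rw [h]
      push_cast
      ring

theorem pv_tri (m : Int) (hm : 0 ≤ m) :
    PySem.Int.floordiv (m * (m + 1)) 2 = ((m.toNat * (m.toNat + 1)) / 2 : Nat) := by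
  rw [PySem.Int.floordiv_eq_ediv_of_pos (by norm_num)]
  have h : m = (m.toNat : Int) := (Int.toNat_of_nonneg hm).symm
  rw [h]
  push_cast [Int.natCast_div]
  norm_num

-- ===== VERDICT (by name: the statement is the Claim_ definition above) =====
theorem solution_spec : Claim_equal_solution := by
  intro x y _
  show solution x y = solution_alt x y
  unfold solution solution_alt
  rw [PySem.List.pyRange_one]
  rw [PySem.List.pyRange_one]
  simp only [Int.sub_zero]
  rw [pv_loop1, pv_loop2]
  have hm : max (y - 1) 0 = ((y - 1).toNat : Int) := by omega
  have hn : max (x - 1) 0 = ((x - 1).toNat : Int) := by omega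
  rw [hm, hn, pv_tri _ (by positivity), pv_tri _ (by positivity)]
  simp only [Int.toNat_natCast, List.sum_cons, List.sum_nil]
  ring_nf
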